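-- pv_equiv track=rewrite | github.com/ChrisThompsonTLDR/agentic-programming | scripts/regenerate-ide-mirrors.py | strip_copilot_frontmatter
-- ===== SOURCE A (Python) =====
-- def strip_copilot_frontmatter(content: str) -> str:
--     if not content.startswith("---"):
--         return content
--     end = content.find("\n---\n", 4)
--     if end == -1:
--         return content
--     fm = content[4:end]
--     body = content[end + 5 :]
--     lines = fm.split("\n")
--     out = []
--     i = 0
--     while i < len(lines):
--         line = lines[i]
--         if line.startswith("tools:"):
--             i += 1
--             while i < len(lines):
--                 L = lines[i]
--                 if L.strip() == "" or L.startswith(" ") or L.startswith("\t"):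
--                     i += 1
--                     continue
--                 break
--             continue
--         if line.startswith("mcp-servers:"):
--             i += 1
--             while i < len(lines):
--                 L = lines[i]
--                 if L.strip() == "" or L.startswith(" ") or L.startswith("\t"):
--                     i += 1
--                     continue
--                 break
--             continue
--         out.append(line)
--         i += 1
--     new_fm = "\n".join(out).strip("\n")
--     return "---\n" + new_fm + "\n---\n" + body
-- ===== SOURCE B (Python) =====
-- def strip_copilot_frontmatter(content: str) -> str:
--     if not content.startswith("---"):
--         return content
--     end = content.find("\n---\n", 4)
--     if end == -1:
--         return content
--     fm = content[4:end]
--     body = content[end + 5 :]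
--     # Group the frontmatter lines into blocks: a non-blank, non-indented line
--     # starts a new block; blank or indented lines attach to the current block.
--     blocks = []
--     cur = []
--     for line in fm.split("\n"):
--         if line.strip() == "" or line.startswith(" ") or line.startswith("\t"):
--             cur.append(line)
--         else:
--             blocks.append(cur)
--             cur = [line]
--     blocks.append(cur)
--     # Keep every block whose header is not a stripped key.
--     kept = [
--         b
--         for b in blocks
--         if not (b and (b[0].startswith("tools:") or b[0].startswith("mcp-servers:")))
--     ]
--     new_fm = "\n".join(l for b in kept for l in b).strip("\n")
--     return "---\n" + new_fm + "\n---\n" + body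
-- ===== Notes on version B (the rewrite author's own statement) =====
-- stated objective: simpler
-- what changed: A's index-based outer while-loop with nested lookahead skip-loops is replaced by a group-then-filter decomposition: parse the frontmatter lines into blocks (a non-blank non-indented line starts a block, blank/indented lines attach to it), drop blocks headed by tools:/mcp-servers:, and flatten.
import Mathlib
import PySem

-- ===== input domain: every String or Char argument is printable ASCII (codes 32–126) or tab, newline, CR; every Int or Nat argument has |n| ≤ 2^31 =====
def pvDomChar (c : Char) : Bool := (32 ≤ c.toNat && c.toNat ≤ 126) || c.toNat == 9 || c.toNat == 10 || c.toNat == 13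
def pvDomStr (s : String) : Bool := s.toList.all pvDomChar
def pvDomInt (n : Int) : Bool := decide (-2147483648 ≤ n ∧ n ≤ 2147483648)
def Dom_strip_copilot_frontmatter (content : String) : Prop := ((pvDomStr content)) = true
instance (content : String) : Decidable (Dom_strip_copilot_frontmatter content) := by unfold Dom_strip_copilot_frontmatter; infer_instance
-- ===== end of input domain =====

-- B replaces A's index-based nested skip loops by a group-into-blocks-then-filter decomposition (objective: simpler).

-- shared helper: the Python condition  L.strip() == "" or L.startswith(" ") or L.startswith("\t")
def pvIsAttach (L : String) : Bool :=
  (PySem.Str.strip L == "") || PySem.Str.startswith L " " || PySem.Str.startswith L "\t"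

-- ===== PORT A =====
-- A's inner while-loop: advance i past blank/indented lines
def pvSkipA : List String → List String
  | [] => []
  | L :: rest => if pvIsAttach L then pvSkipA rest else L :: rest

-- termination helper for pvLoopA (cited in its decreasing_by)
theorem pvSkipA_length_le (l : List String) : (pvSkipA l).length ≤ l.length := by
  induction l with
  | nil => simp [pvSkipA]
  | cons L rest ih =>
    simp only [pvSkipA]
    split
    · exact Nat.le_succ_of_le ih
    · exact le_refl _

-- A's outer while-loop over the frontmatter lines
def pvLoopA : List String → List String
  | [] => []
  | line :: rest =>
    if PySem.Str.startswith line "tools:" then pvLoopA (pvSkipA rest)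
    else if PySem.Str.startswith line "mcp-servers:" then pvLoopA (pvSkipA rest)
    else line :: pvLoopA rest
termination_by l => l.length
decreasing_by
  · exact Nat.lt_succ_of_le (pvSkipA_length_le rest)
  · exact Nat.lt_succ_of_le (pvSkipA_length_le rest)
  · exact Nat.lt_succ_of_le (le_refl _)

def strip_copilot_frontmatter (content : String) : String :=
  if !PySem.Str.startswith content "---" then content
  else
    let e := PySem.Str.findFrom content "\n---\n" 4
    if e == -1 then content
    else
      let fm := PySem.Str.slice content (some 4) (some e)
      let body := PySem.Str.slice content (some (e + 5)) none
      let lines := (PySem.Str.split? fm "\n").getD []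
      let out := pvLoopA lines
      let newFm := PySem.Str.stripChars (PySem.Str.join "\n" out) "\n"
      "---\n" ++ newFm ++ "\n---\n" ++ body

-- ===== PORT B =====
def pvIsHdr (L : String) : Bool :=
  PySem.Str.startswith L "tools:" || PySem.Str.startswith L "mcp-servers:"

-- keep a block unless its header line is a stripped key
def pvKeep (b : List String) : Bool :=
  match b with
  | [] => true
  | h :: _ => !pvIsHdr h

-- group lines into blocks: non-attached line starts a new block, attached lines join the current one
def pvBlocks : List String → List String → List (List String)
  | [], cur => [cur]
  | line :: rest, cur =>
    if pvIsAttach line then pvBlocks rest (cur ++ [line])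
    else cur :: pvBlocks rest [line]

def strip_copilot_frontmatter_alt (content : String) : String :=
  if !PySem.Str.startswith content "---" then content
  else
    let e := PySem.Str.findFrom content "\n---\n" 4
    if e == -1 then content
    else
      let fm := PySem.Str.slice content (some 4) (some e)
      let body := PySem.Str.slice content (some (e + 5)) none
      let lines := (PySem.Str.split? fm "\n").getD []
      let kept := (pvBlocks lines []).filter pvKeep
      let newFm := PySem.Str.stripChars (PySem.Str.join "\n" kept.flatten) "\n"
      "---\n" ++ newFm ++ "\n---\n" ++ body

-- ===== PRECONDITION & SPEC =====
def Spec_strip_copilot_frontmatter (content : String) (out : String) : Prop := out = strip_copilot_frontmatter_alt content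
instance (content : String) (out : String) : Decidable (Spec_strip_copilot_frontmatter content out) := by unfold Spec_strip_copilot_frontmatter; infer_instance

-- ===== CLAIM (what is proved, stated in full; the proofs are below) =====
def Claim_equal_strip_copilot_frontmatter : Prop := ∀ (content : String), Dom_strip_copilot_frontmatter content → Spec_strip_copilot_frontmatter content (strip_copilot_frontmatter content)

-- ===== LEMMAS AND PROOFS =====

-- a line whose first character is not whitespace is not attached
theorem pvAtt_false_of_head (L : String) (c : Char) (t : List Char)
    (hL : L.toList = c :: t) (hc : PySem.Chars.isspace c = false) : pvIsAttach L = false := by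
  have hstrip : (PySem.Str.strip L == "") = false := by
    rw [beq_eq_false_iff_ne]
    intro h
    have h2 := congrArg String.toList h
    rw [PySem.Str.toList_strip, hL] at h2
    simp only [PySem.Chars.strip, PySem.Chars.lstrip, PySem.Chars.rstrip,
      List.dropWhile_cons, hc, Bool.false_eq_true, if_false, String.toList_empty,
      List.reverse_eq_nil_iff, List.dropWhile_eq_nil_iff] at h2
    have := h2 c (by simp)
    rw [hc] at this
    exact absurd this (by decide)
  have hsp : (PySem.Str.startswith L " ") = false := by
    rw [PySem.Str.startswith_eq, hL]
    rw [show (" " : String).toList = [' '] from rfl]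
    rw [Bool.eq_false_iff]
    intro h
    rw [PySem.Chars.startswith_iff, List.cons_prefix_cons] at h
    rw [← h.1] at hc
    exact absurd hc (by decide)
  have htb : (PySem.Str.startswith L "\t") = false := by
    rw [PySem.Str.startswith_eq, hL]
    rw [show ("\t" : String).toList = ['\t'] from rfl]
    rw [Bool.eq_false_iff]
    intro h
    rw [PySem.Chars.startswith_iff, List.cons_prefix_cons] at h
    rw [← h.1] at hc
    exact absurd hc (by decide)
  unfold pvIsAttach
  rw [hstrip, hsp, htb]
  rfl

-- an attached line is never a stripped-key header
theorem pvAtt_not_hdr (L : String) (h : pvIsAttach L = true) : pvIsHdr L = false := by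
  rw [Bool.eq_false_iff]
  intro hh
  rw [pvIsHdr, Bool.or_eq_true] at hh
  rcases hh with hh | hh
  · rw [PySem.Str.startswith_eq, PySem.Chars.startswith_iff] at hh
    rw [show ("tools:" : String).toList = ['t','o','o','l','s',':'] from rfl] at hh
    obtain ⟨t, ht⟩ := hh
    have := pvAtt_false_of_head L 't' (['o','o','l','s',':'] ++ t) (by rw [← ht]; rfl) (by decide)
    simp [this] at h
  · rw [PySem.Str.startswith_eq, PySem.Chars.startswith_iff] at hh
    rw [show ("mcp-servers:" : String).toList = ['m','c','p','-','s','e','r','v','e','r','s',':'] from rfl] at hh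
    obtain ⟨t, ht⟩ := hh
    have := pvAtt_false_of_head L 'm' (['c','p','-','s','e','r','v','e','r','s',':'] ++ t) (by rw [← ht]; rfl) (by decide)
    simp [this] at h

theorem pvKeep_append (cur : List String) (l : String) (h : pvIsAttach l = true) :
    pvKeep (cur ++ [l]) = pvKeep cur := by
  cases cur with
  | nil => simp [pvKeep, pvAtt_not_hdr l h]
  | cons a t => simp [pvKeep]

-- unfolding pvLoopA through pvIsHdr
theorem pvLoopA_cons (l : String) (r : List String) :
    pvLoopA (l :: r) = if pvIsHdr l then pvLoopA (pvSkipA r) else l :: pvLoopA r := by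
  cases h1 : PySem.Str.startswith l "tools:" <;>
    cases h2 : PySem.Str.startswith l "mcp-servers:" <;>
      rw [pvLoopA, pvIsHdr, h1, h2] <;> rfl

-- the group-then-filter pipeline agrees with A's index loop, for any current block
theorem pvGen (rest : List String) : ∀ cur : List String,
    ((pvBlocks rest cur).filter pvKeep).flatten
      = (if pvKeep cur then cur else []) ++
        (if pvKeep cur then pvLoopA rest else pvLoopA (pvSkipA rest)) := by
  induction rest with
  | nil =>
    intro cur
    simp only [pvBlocks, pvSkipA, pvLoopA, List.filter]
    cases h : pvKeep cur <;> simp [h]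
  | cons l r ih =>
    intro cur
    by_cases hatt : pvIsAttach l = true
    · rw [show pvBlocks (l :: r) cur = pvBlocks r (cur ++ [l]) by rw [pvBlocks]; simp [hatt]]
      rw [ih (cur ++ [l]), pvKeep_append cur l hatt]
      rw [show pvSkipA (l :: r) = pvSkipA r by rw [pvSkipA]; simp [hatt]]
      rw [pvLoopA_cons, pvAtt_not_hdr l hatt]
      cases h : pvKeep cur <;> simp [h]
    · rw [show pvBlocks (l :: r) cur = cur :: pvBlocks r [l] by rw [pvBlocks]; simp [hatt]]
      rw [show pvSkipA (l :: r) = l :: r by rw [pvSkipA]; simp [hatt]]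
      have hk1 : pvKeep [l] = !pvIsHdr l := rfl
      rw [List.filter_cons]
      cases hc : pvKeep cur
      · simp only [Bool.false_eq_true, if_false]
        rw [ih [l], hk1, pvLoopA_cons]
        cases hh : pvIsHdr l <;> simp
      · simp only [if_true, List.flatten_cons]
        rw [ih [l], hk1, pvLoopA_cons]
        cases hh : pvIsHdr l <;> simp

theorem pvBlocks_eq (lines : List String) :
    ((pvBlocks lines []).filter pvKeep).flatten = pvLoopA lines := by
  have h := pvGen lines []
  simpa [pvKeep] using h

-- ===== VERDICT (by name: the statement is the Claim_ definition above) =====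
theorem strip_copilot_frontmatter_spec : Claim_equal_strip_copilot_frontmatter := by
  intro content _
  unfold Spec_strip_copilot_frontmatter
  simp only [strip_copilot_frontmatter, strip_copilot_frontmatter_alt, pvBlocks_eq]
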